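-- pv_equiv track=rewrite | github.com/MohamadRezaSafari/ML.NET | Python/Natural Language Processing Projects/Image Caption Generator using Deep Learning on Flickr8K dataset/test.py | load_description
-- ===== SOURCE A (Python) =====
-- def load_description(text):
-- 	mapping = dict()
-- 	for line in text.split("\n"):
-- 		token = line.split("\t")
-- 		if len(line) < 2: # remove short descriptions
-- 			continue
-- 		img_id = token[0].split('.')[0] # name of the image
-- 		img_des = token[1]			 # description of the image
-- 		if img_id not in mapping:
-- 			mapping[img_id] = list()
-- 		mapping[img_id].append(img_des)
-- 	return mapping
-- ===== SOURCE B (Python) =====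
-- def load_description(text):
--     # two-phase: flat parse into (id, description) pairs, then group by first-seen id
--     pairs = [(line.split("\t")[0].split(".")[0], line.split("\t")[1])
--              for line in text.split("\n") if len(line) >= 2]
--     keys = list(dict.fromkeys(i for i, _ in pairs))
--     return {k: [d for i, d in pairs if i == k] for k in keys}
-- ===== Notes on version B (the rewrite author's own statement) =====
-- stated objective: alternative
-- what changed: Replaces A's single pass that mutates a dict per line (membership test, list() init, append) with a two-phase decomposition: a flat parsing comprehension into (id, description) pairs, then a grouping comprehension over the first-seen-deduplicated keys.
import Mathlib
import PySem

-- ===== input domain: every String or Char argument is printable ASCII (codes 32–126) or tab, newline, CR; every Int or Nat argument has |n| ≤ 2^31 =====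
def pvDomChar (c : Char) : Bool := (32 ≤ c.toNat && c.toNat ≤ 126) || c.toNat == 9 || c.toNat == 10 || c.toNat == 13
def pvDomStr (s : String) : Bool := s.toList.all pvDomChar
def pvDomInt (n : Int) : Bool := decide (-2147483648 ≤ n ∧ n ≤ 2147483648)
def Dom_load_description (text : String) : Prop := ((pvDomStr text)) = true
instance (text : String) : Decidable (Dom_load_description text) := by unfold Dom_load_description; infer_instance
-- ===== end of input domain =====

-- B replaces A's per-line dict mutation with a two-phase decomposition (flat parse into
-- (id, description) pairs, then group over the first-seen-deduplicated ids); objective: alternative.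

-- ===== PORT A =====
def load_description (text : String) : List (String × List String) :=
  ((((PySem.Str.split? text "\n").getD []).foldl
    (fun (mapping : PySem.Dict String (List String)) line =>
      let token := (PySem.Str.split? line "\t").getD []   -- sep ≠ "", split? is always some
      if PySem.Str.len line < 2 then mapping
      else
        let img_id := PySem.List.pyGetD ((PySem.Str.split? (PySem.List.pyGetD token 0 "") ".").getD []) 0 ""
        -- token[1]: Python raises IndexError when such a line has no tab; Pre_ excludes those inputs
        let img_des := PySem.List.pyGetD token 1 ""
        let mapping := if mapping.contains img_id then mapping else mapping.insert img_id []
        mapping.insert img_id (mapping.getD img_id [] ++ [img_des]))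
    PySem.Dict.empty)).items

-- ===== PORT B =====
def load_description_alt (text : String) : List (String × List String) :=
  let pairs := (((PySem.Str.split? text "\n").getD []).filter
      (fun line => 2 ≤ PySem.Str.len line)).map
    (fun line =>
      (PySem.List.pyGetD
        ((PySem.Str.split? (PySem.List.pyGetD ((PySem.Str.split? line "\t").getD []) 0 "") ".").getD []) 0 "",
       PySem.List.pyGetD ((PySem.Str.split? line "\t").getD []) 1 ""))
  let keys := PySem.List.dedup (pairs.map (fun p => p.1))
  keys.map (fun k => (k, (pairs.filter (fun p => p.1 == k)).map (fun p => p.2)))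

-- ===== PRECONDITION & SPEC =====
-- Pre_ excludes exactly the inputs on which Python A raises IndexError: a line of length ≥ 2
-- that contains no tab (token[1] does not exist).
def Pre_load_description (text : String) : Prop :=
  ∀ line ∈ (PySem.Str.split? text "\n").getD [],
    2 ≤ PySem.Str.len line → 2 ≤ ((PySem.Str.split? line "\t").getD []).length
instance (text : String) : Decidable (Pre_load_description text) := by
  unfold Pre_load_description; infer_instance
def pvWitness_load_description : String := "a.jpg\tdog runs\nb.jpg\tcat\na.jpg\tdog"
def Spec_load_description (text : String) (out : List (String × List String)) : Prop := out = load_description_alt text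
instance (text : String) (out : List (String × List String)) : Decidable (Spec_load_description text out) := by unfold Spec_load_description; infer_instance

-- ===== CLAIM (what is proved, stated in full; the proofs are below) =====
def Claim_equal_load_description : Prop := ∀ (text : String), Dom_load_description text → Pre_load_description text → Spec_load_description text (load_description text)

-- ===== LEMMAS AND PROOFS =====

-- A's per-line mutation ("if img_id not in mapping: mapping[img_id] = list(); append") is one modify
theorem ld_body_step (d : PySem.Dict String (List String)) (k v : String) :
    (let d1 := if d.contains k then d else d.insert k []
     d1.insert k (d1.getD k [] ++ [v])) = d.modify k [] (· ++ [v]) := by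
  have hm : d.modify k [] (· ++ [v]) = d.insert k (d.getD k [] ++ [v]) := rfl
  rw [hm]
  cases hc : d.contains k
  · simp only [Bool.false_eq_true, if_false]
    rw [PySem.Dict.getD_insert_self, PySem.Dict.insert_insert_self,
      PySem.Dict.getD_of_not_contains d [] hc]
  · simp

-- A's loop over the lines is the modify-fold over B's flat (id, description) pair list
set_option maxHeartbeats 1600000 in
theorem ld_fold (L : List String) (d : PySem.Dict String (List String)) :
    L.foldl (fun mapping line =>
      let token := (PySem.Str.split? line "\t").getD []
      if PySem.Str.len line < 2 then mapping
      else
        let img_id := PySem.List.pyGetD ((PySem.Str.split? (PySem.List.pyGetD token 0 "") ".").getD []) 0 ""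
        let img_des := PySem.List.pyGetD token 1 ""
        let mapping := if mapping.contains img_id then mapping else mapping.insert img_id []
        mapping.insert img_id (mapping.getD img_id [] ++ [img_des])) d
    = ((L.filter (fun line => 2 ≤ PySem.Str.len line)).map
        (fun line =>
          (PySem.List.pyGetD
            ((PySem.Str.split? (PySem.List.pyGetD ((PySem.Str.split? line "\t").getD []) 0 "") ".").getD []) 0 "",
           PySem.List.pyGetD ((PySem.Str.split? line "\t").getD []) 1 ""))).foldl
        (fun d p => d.modify p.1 [] (· ++ [p.2])) d := by
  induction L generalizing d with
  | nil => rfl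
  | cons x xs ih =>
    rw [List.foldl_cons, List.filter_cons]
    by_cases h : PySem.Str.len x < 2
    · rw [if_pos h, if_neg (by simp only [decide_eq_true_eq]; omega)]
      exact ih d
    · rw [if_neg h, if_pos (by simp only [decide_eq_true_eq]; omega), List.map_cons,
        List.foldl_cons, ld_body_step]
      exact ih _

theorem ld_eq (text : String) : load_description text = load_description_alt text := by
  unfold load_description load_description_alt
  rw [ld_fold]
  rw [PySem.Dict.items_eq_map_keys _
    (PySem.Dict.nodup_keys_foldl_modify_key _ Prod.fst [] (fun _ p => (· ++ [p.2])) _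
      (by simp)) []]
  simp only [PySem.Dict.keys_foldl_modify_key, PySem.Dict.keys_empty, PySem.Set.update_nil_left,
    PySem.Dict.getD_foldl_modify_append, PySem.Dict.getD_empty, List.nil_append,
    PySem.List.dedup_eq_ofList]

-- ===== VERDICT (by name: the statement is the Claim_ definition above) =====
theorem load_description_spec : Claim_equal_load_description := by
  intro text _ _
  unfold Spec_load_description
  exact ld_eq text
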